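-- pv_equiv track=rewrite | github.com/mengsi16/mengsi16-knowlege-base | bin/chunker.py | _contains_table
-- ===== SOURCE A (Python) =====
-- def _contains_table(text: str) -> bool:
--     """判断文本是否包含 Markdown 表格（3 行以上 | 开头），忽略代码块内的行"""
--     lines = text.strip().split("\n")
--     in_code = False
--     table_lines = 0
--     for l in lines:
--         if l.strip().startswith("```"):
--             in_code = not in_code
--             continue
--         if not in_code and l.strip().startswith("|"):
--             table_lines += 1
--     return table_lines >= 3
-- ===== SOURCE B (Python) =====
-- def _contains_table(text: str) -> bool:
--     # Partition stripped lines into segments at every ``` fence; even-indexed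
--     # segments are outside code blocks. Count '|' lines there.
--     segments = [[]]
--     for l in text.strip().split("\n"):
--         s = l.strip()
--         if s.startswith("```"):
--             segments.append([])
--         else:
--             segments[-1].append(s)
--     count = sum(1 for i, seg in enumerate(segments) if i % 2 == 0
--                   for s in seg if s.startswith("|"))
--     return count >= 3
-- ===== Notes on version B (the rewrite author's own statement) =====
-- stated objective: alternative
-- what changed: Replaces the per-line in_code toggle-and-count with a partition of the lines into fence-delimited segments followed by a count of '|' lines in the even-indexed (outside-code) segments.
import Mathlib
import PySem

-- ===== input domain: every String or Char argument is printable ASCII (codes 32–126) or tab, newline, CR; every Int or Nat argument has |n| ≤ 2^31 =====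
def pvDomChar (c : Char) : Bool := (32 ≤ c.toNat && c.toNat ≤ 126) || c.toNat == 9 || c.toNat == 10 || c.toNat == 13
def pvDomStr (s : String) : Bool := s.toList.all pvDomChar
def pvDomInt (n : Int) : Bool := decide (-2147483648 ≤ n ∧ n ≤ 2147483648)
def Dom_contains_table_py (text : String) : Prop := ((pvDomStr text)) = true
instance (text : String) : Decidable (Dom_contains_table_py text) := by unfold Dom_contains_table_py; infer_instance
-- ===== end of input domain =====

-- B replaces A's per-line in_code toggle with a partition into fence-delimited
-- segments followed by a count over the even-indexed (outside-code) segments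
-- (objective: alternative decomposition, same cost).

-- ===== PORT A =====
-- str.split("\n") never fails in Python (sep ≠ ""), so Str.split? is some; .getD [] is exact here
def contains_table_py (text : String) : Bool :=
  let lines := (PySem.Str.split? (PySem.Str.strip text) "\n").getD []
  let st := lines.foldl (fun (st : Bool × Nat) l =>
      if PySem.Str.startswith (PySem.Str.strip l) "```" then (!st.1, st.2)
      else if !st.1 && PySem.Str.startswith (PySem.Str.strip l) "|" then (st.1, st.2 + 1)
      else st) (false, 0)
  decide (3 ≤ st.2)

-- ===== PORT B =====
def contains_table_py_alt (text : String) : Bool :=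
  let st := (((PySem.Str.split? (PySem.Str.strip text) "\n").getD []).foldl
      (fun (st : List (List String) × List String) l =>
        let s := PySem.Str.strip l
        if PySem.Str.startswith s "```" then (st.1 ++ [st.2], [])
        else (st.1, st.2 ++ [s])) ([], []))
  let segments := st.1 ++ [st.2]
  let count := (PySem.List.enumerate segments 0).foldl
      (fun (n : Nat) p =>
        if PySem.Int.mod p.1 2 == 0 then
          n + p.2.countP (fun s => PySem.Str.startswith s "|")
        else n) 0
  decide (3 ≤ count)

-- ===== PRECONDITION & SPEC =====
def Spec_contains_table_py (text : String) (out : Bool) : Prop := out = contains_table_py_alt text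
instance (text : String) (out : Bool) : Decidable (Spec_contains_table_py text out) := by unfold Spec_contains_table_py; infer_instance

-- ===== CLAIM (what is proved, stated in full; the proofs are below) =====
def Claim_equal_contains_table_py : Prop := ∀ (text : String), Dom_contains_table_py text → Spec_contains_table_py text (contains_table_py text)

-- ===== LEMMAS AND PROOFS =====

-- proof-side helpers: the segment view of the line stream
def pvCnt (seg : List String) : Nat := seg.countP (fun s => PySem.Str.startswith s "|")

def pvCntP : Bool → List (List String) → Nat
  | _, [] => 0
  | true, x :: xs => pvCnt x + pvCntP false xs
  | false, _ :: xs => pvCntP true xs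

def pvSegs : List String → List String → List (List String)
  | [], cur => [cur]
  | l :: ls, cur =>
    if PySem.Str.startswith (PySem.Str.strip l) "```" then cur :: pvSegs ls []
    else pvSegs ls (cur ++ [PySem.Str.strip l])

theorem pvSegsFold (ls : List String) (done : List (List String)) (cur : List String) :
    (ls.foldl (fun (st : List (List String) × List String) l =>
        let s := PySem.Str.strip l
        if PySem.Str.startswith s "```" then (st.1 ++ [st.2], [])
        else (st.1, st.2 ++ [s])) (done, cur)).1 ++
    [(ls.foldl (fun (st : List (List String) × List String) l =>
        let s := PySem.Str.strip l
        if PySem.Str.startswith s "```" then (st.1 ++ [st.2], [])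
        else (st.1, st.2 ++ [s])) (done, cur)).2] = done ++ pvSegs ls cur := by
  induction ls generalizing done cur with
  | nil => simp [pvSegs]
  | cons l ls ih =>
    rw [List.foldl_cons]
    by_cases h : PySem.Str.startswith (PySem.Str.strip l) "```" = true
    · simp only [if_pos h, pvSegs, ih]
      simp
    · simp only [if_neg h, pvSegs, ih]

theorem pvCntP_segs_cur (ls : List String) (cur : List String) :
    pvCntP true (pvSegs ls cur) = pvCnt cur + pvCntP true (pvSegs ls []) ∧
    pvCntP false (pvSegs ls cur) = pvCntP false (pvSegs ls []) := by
  induction ls generalizing cur with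
  | nil => simp [pvSegs, pvCntP, pvCnt]
  | cons l ls ih =>
    by_cases h : PySem.Str.startswith (PySem.Str.strip l) "```" = true
    · simp only [pvSegs, if_pos h, pvCntP]
      simp [pvCnt]
    · simp only [pvSegs, if_neg h, List.nil_append]
      refine ⟨?_, ?_⟩
      · rw [(ih (cur ++ [PySem.Str.strip l])).1, (ih [PySem.Str.strip l]).1,
            pvCnt, pvCnt, List.countP_append]
        simp [pvCnt]
        omega
      · rw [(ih (cur ++ [PySem.Str.strip l])).2, (ih [PySem.Str.strip l]).2]

theorem pvMain (ls : List String) (n : Nat) :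
    (ls.foldl (fun (st : Bool × Nat) l =>
        if PySem.Str.startswith (PySem.Str.strip l) "```" then (!st.1, st.2)
        else if !st.1 && PySem.Str.startswith (PySem.Str.strip l) "|" then (st.1, st.2 + 1)
        else st) (false, n)).2 = n + pvCntP true (pvSegs ls []) ∧
    (ls.foldl (fun (st : Bool × Nat) l =>
        if PySem.Str.startswith (PySem.Str.strip l) "```" then (!st.1, st.2)
        else if !st.1 && PySem.Str.startswith (PySem.Str.strip l) "|" then (st.1, st.2 + 1)
        else st) (true, n)).2 = n + pvCntP false (pvSegs ls []) := by
  induction ls generalizing n with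
  | nil => simp [pvSegs, pvCntP, pvCnt]
  | cons l ls ih =>
    simp only [List.foldl_cons]
    by_cases h : PySem.Str.startswith (PySem.Str.strip l) "```" = true
    · refine ⟨?_, ?_⟩
      · simp only [if_pos h, Bool.not_false]
        rw [(ih n).2, pvSegs, if_pos h]
        simp [pvCntP, pvCnt]
      · simp only [if_pos h, Bool.not_true]
        rw [(ih n).1, pvSegs, if_pos h]
        simp [pvCntP]
    · have hp2t : ∀ b : Bool, PySem.Str.startswith (PySem.Str.strip l) "|" = b →
          PySem.Chars.startswith (PySem.Chars.strip l.toList) ['|'] = b := by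
        intro b hb; simpa using hb
      by_cases hp : PySem.Str.startswith (PySem.Str.strip l) "|" = true
      · refine ⟨?_, ?_⟩
        · have hc : (!(false, n).1 && PySem.Str.startswith (PySem.Str.strip l) "|") = true := by
            simpa using hp
          simp only [if_neg h, if_pos hc]
          rw [(ih (n + 1)).1, pvSegs, if_neg h, List.nil_append,
              (pvCntP_segs_cur ls [PySem.Str.strip l]).1]
          simp [pvCnt, hp2t true hp]
          omega
        · have hc : ¬((!(true, n).1 && PySem.Str.startswith (PySem.Str.strip l) "|") = true) := by
            simp
          simp only [if_neg h, if_neg hc]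
          rw [(ih n).2, pvSegs, if_neg h, List.nil_append,
              (pvCntP_segs_cur ls [PySem.Str.strip l]).2]
      · have hpf : PySem.Str.startswith (PySem.Str.strip l) "|" = false := by
          simpa using hp
        have hcf := hp2t false hpf
        refine ⟨?_, ?_⟩
        · have hc : ¬((!(false, n).1 && PySem.Str.startswith (PySem.Str.strip l) "|") = true) := by
            simp [hcf]
          simp only [if_neg h, if_neg hc]
          rw [(ih n).1, pvSegs, if_neg h, List.nil_append,
              (pvCntP_segs_cur ls [PySem.Str.strip l]).1]
          simp [pvCnt, hcf]
        · have hc : ¬((!(true, n).1 && PySem.Str.startswith (PySem.Str.strip l) "|") = true) := by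
            simp
          simp only [if_neg h, if_neg hc]
          rw [(ih n).2, pvSegs, if_neg h, List.nil_append,
              (pvCntP_segs_cur ls [PySem.Str.strip l]).2]

theorem pvEnumCount (segs : List (List String)) (s : Int) (n : Nat) (hs : 0 ≤ s) :
    (PySem.List.enumerate segs s).foldl
      (fun (n : Nat) p =>
        if PySem.Int.mod p.1 2 == 0 then
          n + p.2.countP (fun s => PySem.Str.startswith s "|")
        else n) n = n + pvCntP (decide (s % 2 = 0)) segs := by
  induction segs generalizing s n with
  | nil => simp [PySem.List.enumerate, pvCntP]
  | cons x xs ih =>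
    rw [PySem.List.enumerate_cons, List.foldl_cons]
    by_cases h : s % 2 = 0
    · have hm : (PySem.Int.mod s 2 == 0) = true := by
        simp [PySem.Int.mod, Int.fmod_eq_emod]
        omega
      have h1 : ¬ (s + 1) % 2 = 0 := by omega
      simp only [hm, if_true, h, decide_true]
      rw [ih (s + 1) _ (by omega)]
      simp [h1, pvCntP, pvCnt]
      omega
    · have hm : (PySem.Int.mod s 2 == 0) = false := by
        simp [PySem.Int.mod, Int.fmod_eq_emod]
        omega
      have h1 : (s + 1) % 2 = 0 := by omega
      simp only [hm, Bool.false_eq_true, if_false, h, decide_false]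
      rw [ih (s + 1) _ (by omega)]
      simp [h1, pvCntP]

-- ===== VERDICT (by name: the statement is the Claim_ definition above) =====
theorem contains_table_py_spec : Claim_equal_contains_table_py := by
  intro text _
  unfold Spec_contains_table_py contains_table_py contains_table_py_alt
  have hseg := pvSegsFold ((PySem.Str.split? (PySem.Str.strip text) "\n").getD []) [] []
  simp only [List.nil_append] at hseg
  simp only [hseg]
  rw [pvEnumCount _ 0 0 le_rfl,
      (pvMain ((PySem.Str.split? (PySem.Str.strip text) "\n").getD []) 0).1]
  simp
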